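-- pv_equiv track=rewrite | github.com/Not-Buddy/lms-gae | codingchallenge/17TheHiddenHavens.py | count_closed_islands
-- ===== SOURCE A (Python) =====
-- from typing import List
--
-- def count_closed_islands(grid: List[List[int]]) -> int:
--     m, n = len(grid), len(grid[0])
--
--     def dfs(r, c):
--         if r < 0 or c < 0 or r >= m or c >= n:
--             return False
--         if grid[r][c] == 1:
--             return True
--
--         grid[r][c] = 1
--
--         up = dfs(r - 1, c)
--         down = dfs(r + 1, c)
--         left = dfs(r, c - 1)
--         right = dfs(r, c + 1)
--
--         return up and down and left and right
--
--     count = 0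
--
--     for i in range(m):
--         for j in range(n):
--             if grid[i][j] == 0:
--                 if dfs(i, j):
--                     count += 1
--
--     return count
-- ===== SOURCE B (Python) =====
-- from typing import List
--
-- def count_closed_islands(grid: List[List[int]]) -> int:
--     m, n = len(grid), len(grid[0])
--
--     def flood(r, c):
--         # iterative flood fill: turn the whole non-1 region containing (r, c) into 1s
--         stack = [(r, c)]
--         while stack:
--             x, y = stack.pop()
--             if 0 <= x < m and 0 <= y < n and grid[x][y] != 1:
--                 grid[x][y] = 1
--                 stack.extend([(x - 1, y), (x + 1, y), (x, y - 1), (x, y + 1)])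
--
--     # pass 1: remove every region that touches the border
--     for i in range(m):
--         for j in range(n):
--             if (i == 0 or i == m - 1 or j == 0 or j == n - 1) and grid[i][j] != 1:
--                 flood(i, j)
--
--     # pass 2: every remaining region seeded at a 0 is closed; count and remove it
--     count = 0
--     for i in range(m):
--         for j in range(n):
--             if grid[i][j] == 0:
--                 count += 1
--                 flood(i, j)
--     return count
-- ===== Notes on version B (the rewrite author's own statement) =====
-- stated objective: alternative
-- what changed: Replaces A's single pass of recursive DFS that ANDs the four directions to detect border contact with a two-pass scheme: an explicit-stack flood fill first erases every region touching the border, then a second scan counts and erases the remaining (necessarily closed) regions.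
import Mathlib
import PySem

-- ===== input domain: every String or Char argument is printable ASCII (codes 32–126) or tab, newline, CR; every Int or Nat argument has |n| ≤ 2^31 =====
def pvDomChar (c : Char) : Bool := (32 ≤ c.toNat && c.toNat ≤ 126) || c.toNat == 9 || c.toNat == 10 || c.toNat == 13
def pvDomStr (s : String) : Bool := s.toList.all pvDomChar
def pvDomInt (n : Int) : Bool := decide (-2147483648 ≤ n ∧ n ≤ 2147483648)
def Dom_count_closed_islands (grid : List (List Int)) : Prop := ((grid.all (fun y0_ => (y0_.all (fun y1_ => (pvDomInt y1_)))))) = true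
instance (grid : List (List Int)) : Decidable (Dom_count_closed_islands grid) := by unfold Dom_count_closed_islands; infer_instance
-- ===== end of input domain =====

-- B replaces A's direction-ANDing recursive DFS by two passes (erase border-touching
-- regions with an explicit-stack flood fill, then count and erase the survivors); the
-- equivalence proved here is about the RETURN value only (both Pythons mutate the grid,
-- but B may also clear non-zero border regions that A leaves untouched).

-- shared cell primitives (both ports read/write grid cells this way)
def pvCell (g : List (List Int)) (r c : Int) : Option Int :=
  if 0 ≤ r ∧ 0 ≤ c then (g[r.toNat]?).bind (fun row => row[c.toNat]?) else none

def pvSet (g : List (List Int)) (r c : Int) (v : Int) : List (List Int) :=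
  g.modify r.toNat (fun row => row.set c.toNat v)

-- scan order of the double loops, and the number of non-1 cells in the m×n window
def pvScan (mN nN : Nat) : List (Int × Int) :=
  (List.range mN).flatMap (fun (i : Nat) => (List.range nN).map (fun (j : Nat) => ((i : Int), (j : Int))))

def pvCount (mN nN : Nat) (g : List (List Int)) : Nat :=
  (pvScan mN nN).countP (fun p => decide (pvCell g p.1 p.2 ≠ some 1))

-- cell update / scan membership facts (used by pvFloodB's termination proof)
theorem pvCell_pvSet (g : List (List Int)) (r c : Int) (v : Int)
    (hr : 0 ≤ r) (hc : 0 ≤ c) (hs : (pvCell g r c).isSome) (a b : Int) :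
    pvCell (pvSet g r c v) a b = if a = r ∧ b = c then some v else pvCell g a b := by
  unfold pvCell pvSet
  by_cases hab : 0 ≤ a ∧ 0 ≤ b
  · simp only [if_pos hab, List.getElem?_modify]
    by_cases har : a = r
    · have htn : r.toNat = a.toNat := by omega
      cases hg : g[a.toNat]? with
      | none =>
        exfalso
        simp only [pvCell, if_pos (And.intro hr hc)] at hs
        simp [htn ▸ hg] at hs
      | some row =>
        have hcl : c.toNat < row.length := by
          simp only [pvCell, if_pos (And.intro hr hc), htn, hg, Option.bind_some] at hs
          simpa [isSome_getElem?] using hs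
        simp only [hg, Option.map_some, htn, if_pos rfl, Option.bind_some, List.getElem?_set]
        by_cases hbc : b = c
        · have : c.toNat = b.toNat := by omega
          simp [this.symm, hcl, har, hbc]
        · have : ¬ (c.toNat = b.toNat) := by omega
          simp [this, hbc]
    · have htn : ¬ (r.toNat = a.toNat) := by omega
      cases hg : g[a.toNat]? with
      | none => simp [hg, har, hab]
      | some row => simp [hg, htn, har, hab]
  · have : ¬ (a = r ∧ b = c) := by rintro ⟨rfl, rfl⟩; exact hab ⟨hr, hc⟩
    simp [hab, this]


theorem mem_pvScan (mN nN : Nat) (p : Int × Int) :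
    p ∈ pvScan mN nN ↔ 0 ≤ p.1 ∧ p.1 < (mN : Int) ∧ 0 ≤ p.2 ∧ p.2 < (nN : Int) := by
  obtain ⟨a, b⟩ := p
  unfold pvScan
  constructor
  · intro h
    rw [List.mem_flatMap] at h
    obtain ⟨i, hi, hmem⟩ := h
    rw [List.mem_map] at hmem
    obtain ⟨j, hj, hEq⟩ := hmem
    have hi' := List.mem_range.1 hi
    have hj' := List.mem_range.1 hj
    cases hEq
    refine ⟨?_, ?_, ?_, ?_⟩ <;> simp [Int.ofNat_eq_natCast] <;> omega
  · rintro ⟨ha0, ham, hb0, hbn⟩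
    rw [List.mem_flatMap]
    refine ⟨a.toNat, List.mem_range.2 (by omega), ?_⟩
    rw [List.mem_map]
    refine ⟨b.toNat, List.mem_range.2 (by omega), ?_⟩
    simp only [Prod.mk.injEq, Int.ofNat_eq_natCast]
    constructor <;> omega


-- ===== PORT A =====
def pvDfsA (m n : Int) : Nat → List (List Int) → Int → Int → List (List Int) × Bool
  | 0, g, _, _ => (g, false)
  | Nat.succ fuel, g, r, c =>
    if r < 0 ∨ c < 0 ∨ r ≥ m ∨ c ≥ n then (g, false)
    else
      match pvCell g r c with
      | none => (g, false)       -- Python raises here (short row); outside Pre_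
      | some v =>
        if v = 1 then (g, true)
        else
          let out1 := pvDfsA m n fuel (pvSet g r c 1) (r - 1) c
          let out2 := pvDfsA m n fuel out1.1 (r + 1) c
          let out3 := pvDfsA m n fuel out2.1 r (c - 1)
          let out4 := pvDfsA m n fuel out3.1 r (c + 1)
          (out4.1, out1.2 && out2.2 && out3.2 && out4.2)

def count_closed_islands (grid : List (List Int)) : Int :=
  match grid[0]? with
  | none => 0                    -- Python raises on len(grid[0]); outside Pre_
  | some row0 =>
    let m : Int := grid.length
    let n : Int := row0.length
    -- fuel: each recursive layer kills one non-1 cell of the m×n window, so m*n+1 is enough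
    let fuel : Nat := grid.length * row0.length + 1
    (((List.range grid.length).foldl (fun (st : List (List Int) × Int) (i : Nat) =>
        (List.range row0.length).foldl (fun (st : List (List Int) × Int) (j : Nat) =>
          if pvCell st.1 (i : Int) (j : Int) = some 0 then
            let out := pvDfsA m n fuel st.1 (i : Int) (j : Int)
            (out.1, st.2 + (if out.2 then 1 else 0))
          else st) st) (grid, 0)).2 : Int)

-- ===== PORT B =====
-- termination lemma for the flood-fill worklist loop: overwriting a non-1 in-window
-- cell with 1 strictly decreases the number of non-1 cells of the window
theorem pvCount_set_lt (mN nN : Nat) (g : List (List Int)) (x y : Int) (v : Int)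
    (hx0 : 0 ≤ x) (hx : x < (mN : Int)) (hy0 : 0 ≤ y) (hy : y < (nN : Int))
    (hv : pvCell g x y = some v) (hv1 : v ≠ 1) :
    pvCount mN nN (pvSet g x y 1) < pvCount mN nN g := by
  have hset := pvCell_pvSet g x y 1 hx0 hy0 (by simp [hv]) 
  have hmono : ∀ q : Int × Int,
      (decide (pvCell (pvSet g x y 1) q.1 q.2 ≠ some 1)) = true →
      (decide (pvCell g q.1 q.2 ≠ some 1)) = true := by
    intro q hq
    rw [hset q.1 q.2] at hq
    by_cases h : q.1 = x ∧ q.2 = y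
    · simp [h] at hq
    · simpa [h] using hq
  obtain ⟨s, t, hst⟩ := List.append_of_mem ((mem_pvScan mN nN (x, y)).2 ⟨hx0, hx, hy0, hy⟩)
  unfold pvCount
  rw [hst, List.countP_append, List.countP_append, List.countP_cons, List.countP_cons]
  have h1 : List.countP (fun p => decide (pvCell (pvSet g x y 1) p.1 p.2 ≠ some 1)) s
      ≤ List.countP (fun p => decide (pvCell g p.1 p.2 ≠ some 1)) s :=
    List.countP_mono_left (fun q _ => hmono q)
  have h2 : List.countP (fun p => decide (pvCell (pvSet g x y 1) p.1 p.2 ≠ some 1)) t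
      ≤ List.countP (fun p => decide (pvCell g p.1 p.2 ≠ some 1)) t :=
    List.countP_mono_left (fun q _ => hmono q)
  have hnew : (decide (pvCell (pvSet g x y 1) x y ≠ some 1)) = false := by
    rw [hset x y]; simp
  have hold : (decide (pvCell g x y ≠ some 1)) = true := by simp [hv, hv1]
  rw [hnew, hold]
  simp only [Bool.false_eq_true, if_false, if_true]
  omega

def pvFloodB (m n : Int) (g : List (List Int)) (stack : List (Int × Int)) : List (List Int) :=
  match stack with
  | [] => g
  | (x, y) :: rest =>
    if 0 ≤ x ∧ x < m ∧ 0 ≤ y ∧ y < n then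
      match h : pvCell g x y with
      | none => pvFloodB m n g rest       -- Python raises here (short row); outside Pre_
      | some v =>
        if v = 1 then pvFloodB m n g rest
        else pvFloodB m n (pvSet g x y 1)
              ((x, y + 1) :: (x, y - 1) :: (x + 1, y) :: (x - 1, y) :: rest)
    else pvFloodB m n g rest
termination_by (pvCount m.toNat n.toNat g, stack.length)
decreasing_by
  · exact Prod.Lex.right _ (Nat.lt_succ_self _)
  · exact Prod.Lex.right _ (Nat.lt_succ_self _)
  · rename_i hb hv1
    refine Prod.Lex.left _ _ ?_
    refine pvCount_set_lt _ _ _ _ _ v hb.1 ?_ hb.2.2.1 ?_ h ?_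
    · omega
    · omega
    · simpa using hv1
  · exact Prod.Lex.right _ (Nat.lt_succ_self _)

def count_closed_islands_alt (grid : List (List Int)) : Int :=
  match grid[0]? with
  | none => 0                    -- Python raises on len(grid[0]); outside Pre_
  | some row0 =>
    let m : Int := grid.length
    let n : Int := row0.length
    -- pass 1: erase every region touching the border
    let g1 := (List.range grid.length).foldl (fun (g : List (List Int)) (i : Nat) =>
        (List.range row0.length).foldl (fun (g : List (List Int)) (j : Nat) =>
          if ((i : Int) = 0 ∨ (i : Int) = m - 1 ∨ (j : Int) = 0 ∨ (j : Int) = n - 1)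
              ∧ pvCell g (i : Int) (j : Int) ≠ some 1 then
            pvFloodB m n g [((i : Int), (j : Int))]
          else g) g) grid
    -- pass 2: count and erase the remaining regions seeded at 0s
    (((List.range grid.length).foldl (fun (st : List (List Int) × Int) (i : Nat) =>
        (List.range row0.length).foldl (fun (st : List (List Int) × Int) (j : Nat) =>
          if pvCell st.1 (i : Int) (j : Int) = some 0 then
            (pvFloodB m n st.1 [((i : Int), (j : Int))], st.2 + 1)
          else st) st) (g1, 0)).2 : Int)

-- ===== PRECONDITION & SPEC =====
-- Pre_ excludes exactly the inputs on which A raises IndexError: the empty grid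
-- (len(grid[0])) and ragged grids with a row shorter than row 0 (grid[r][c] lookups).
def Pre_count_closed_islands (grid : List (List Int)) : Prop :=
  grid ≠ [] ∧ ∀ row ∈ grid, (grid.headD []).length ≤ row.length

instance (grid : List (List Int)) : Decidable (Pre_count_closed_islands grid) := by
  unfold Pre_count_closed_islands; infer_instance

def pvWitness_count_closed_islands : List (List Int) :=
  [[1, 1, 1, 1], [1, 0, 1, 0], [1, 1, 1, 0]]

def Spec_count_closed_islands (grid : List (List Int)) (out : Int) : Prop := out = count_closed_islands_alt grid
instance (grid : List (List Int)) (out : Int) : Decidable (Spec_count_closed_islands grid out) := by unfold Spec_count_closed_islands; infer_instance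

-- ===== CLAIM (what is proved, stated in full; the proofs are below) =====
def Claim_equal_count_closed_islands : Prop := ∀ (grid : List (List Int)), Dom_count_closed_islands grid → Pre_count_closed_islands grid → Spec_count_closed_islands grid (count_closed_islands grid)

-- ===== LEMMAS AND PROOFS =====

-- ===== proof layer: windows, water cells, reachability =====
def InW (m n : Int) (p : Int × Int) : Prop := 0 ≤ p.1 ∧ p.1 < m ∧ 0 ≤ p.2 ∧ p.2 < n

def Wat (m n : Int) (g : List (List Int)) (p : Int × Int) : Prop :=
  InW m n p ∧ pvCell g p.1 p.2 ≠ some 1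

def AdjP (p q : Int × Int) : Prop :=
  q = (p.1 - 1, p.2) ∨ q = (p.1 + 1, p.2) ∨ q = (p.1, p.2 - 1) ∨ q = (p.1, p.2 + 1)

def Reach (m n : Int) (g : List (List Int)) (p q : Int × Int) : Prop :=
  Relation.ReflTransGen (fun a b => AdjP a b ∧ Wat m n g b) p q

def IntR (m n : Int) (p : Int × Int) : Prop :=
  1 ≤ p.1 ∧ p.1 < m - 1 ∧ 1 ≤ p.2 ∧ p.2 < n - 1

def ClosedP (m n : Int) (g : List (List Int)) (p : Int × Int) : Prop :=
  ∀ q, Reach m n g p q → IntR m n q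

def RectP (m n : Int) (g : List (List Int)) : Prop :=
  ∀ p : Int × Int, InW m n p → (pvCell g p.1 p.2).isSome

-- "kill-only" evolution: cells are unchanged or overwritten with 1
def KO (m n : Int) (g g' : List (List Int)) : Prop :=
  ∀ q : Int × Int, InW m n q →
    pvCell g' q.1 q.2 = pvCell g q.1 q.2 ∨ pvCell g' q.1 q.2 = some 1

theorem AdjP_symm {p q : Int × Int} (h : AdjP p q) : AdjP q p := by
  obtain ⟨a, b⟩ := p; obtain ⟨c, d⟩ := q
  simp only [AdjP, Prod.mk.injEq] at h ⊢
  omega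

theorem wat_of_reach {m n : Int} {g : List (List Int)} {p q : Int × Int}
    (hp : Wat m n g p) (h : Reach m n g p q) : Wat m n g q := by
  induction h with
  | refl => exact hp
  | tail _ hstep ih => exact hstep.2

theorem reach_symm {m n : Int} {g : List (List Int)} {p q : Int × Int}
    (hp : Wat m n g p) (h : Reach m n g p q) : Reach m n g q p := by
  induction h with
  | refl => exact Relation.ReflTransGen.refl
  | tail hab hstep ih =>
    exact Relation.ReflTransGen.head ⟨AdjP_symm hstep.1, wat_of_reach hp hab⟩ ih

theorem KO_trans {m n : Int} {g1 g2 g3 : List (List Int)}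
    (h12 : KO m n g1 g2) (h23 : KO m n g2 g3) : KO m n g1 g3 := by
  intro q hq
  rcases h23 q hq with h | h
  · rw [h]; exact h12 q hq
  · exact Or.inr h

theorem wat_KO {m n : Int} {g g' : List (List Int)} (hko : KO m n g g')
    {q : Int × Int} (h : Wat m n g' q) : Wat m n g q := by
  rcases h with ⟨hin, hne⟩
  rcases hko q hin with he | he
  · exact ⟨hin, he ▸ hne⟩
  · exact absurd he hne

theorem reach_KO {m n : Int} {g g' : List (List Int)} (hko : KO m n g g')
    {p q : Int × Int} (h : Reach m n g' p q) : Reach m n g p q := by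
  induction h with
  | refl => exact Relation.ReflTransGen.refl
  | tail _ hstep ih => exact Relation.ReflTransGen.tail ih ⟨hstep.1, wat_KO hko hstep.2⟩

theorem reach_preserve {m n : Int} {g g' : List (List Int)} {p : Int × Int}
    (hp : Wat m n g p)
    (hag : ∀ x, Reach m n g p x → pvCell g' x.1 x.2 = pvCell g x.1 x.2)
    {q : Int × Int} (h : Reach m n g p q) : Reach m n g' p q := by
  induction h with
  | refl => exact Relation.ReflTransGen.refl
  | tail hab hstep ih =>
    refine Relation.ReflTransGen.tail ih ⟨hstep.1, hstep.2.1, ?_⟩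
    rw [hag _ (Relation.ReflTransGen.tail hab hstep)]
    exact hstep.2.2

theorem rect_KO {m n : Int} {g g' : List (List Int)} (hR : RectP m n g)
    (hko : KO m n g g') : RectP m n g' := by
  intro q hq
  rcases hko q hq with h | h
  · rw [h]; exact hR q hq
  · rw [h]; rfl

theorem pvCount_KO {mN nN : Nat} {g g' : List (List Int)}
    (hko : KO (mN : Int) (nN : Int) g g') : pvCount mN nN g' ≤ pvCount mN nN g := by
  refine List.countP_mono_left (fun q hq hpred => ?_)
  have hin : InW (mN : Int) (nN : Int) q := (mem_pvScan mN nN q).1 hq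
  rcases hko q hin with h | h
  · rwa [h] at hpred
  · simp [h] at hpred
theorem pvFloodB_nil (m n : Int) (g : List (List Int)) : pvFloodB m n g [] = g := by
  rw [pvFloodB]

theorem pvFloodB_kill (m n : Int) (g : List (List Int)) (x y : Int) (rest : List (Int × Int))
    (hb : 0 ≤ x ∧ x < m ∧ 0 ≤ y ∧ y < n) {v : Int} (hc : pvCell g x y = some v) (hv : v ≠ 1) :
    pvFloodB m n g ((x, y) :: rest)
      = pvFloodB m n (pvSet g x y 1) ((x, y + 1) :: (x, y - 1) :: (x + 1, y) :: (x - 1, y) :: rest) := by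
  rw [pvFloodB, if_pos hb]
  split
  · simp_all
  · rename_i v' hc'
    rw [hc] at hc'
    injection hc' with hv'
    subst hv'
    rw [if_neg hv]

theorem pvFloodB_skip (m n : Int) (g : List (List Int)) (x y : Int) (rest : List (Int × Int))
    (h : ¬ (0 ≤ x ∧ x < m ∧ 0 ≤ y ∧ y < n) ∨ pvCell g x y = some 1) :
    pvFloodB m n g ((x, y) :: rest) = pvFloodB m n g rest := by
  rw [pvFloodB]
  rcases Classical.em (0 ≤ x ∧ x < m ∧ 0 ≤ y ∧ y < n) with hb | hb
  · rw [if_pos hb]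
    rcases h with h | h
    · exact absurd hb h
    · split
      · rfl
      · rename_i v' hc'
        have hv' := Option.some.inj (h.symm.trans hc')
        rw [if_pos hv'.symm]
  · rw [if_neg hb]

theorem floodB_char (m n : Int) (g : List (List Int)) (stack : List (Int × Int))
    (hR : RectP m n g) (q : Int × Int) (hq : InW m n q) :
    ((∃ p ∈ stack, Wat m n g p ∧ Reach m n g p q) →
        pvCell (pvFloodB m n g stack) q.1 q.2 = some 1)
    ∧ (¬ (∃ p ∈ stack, Wat m n g p ∧ Reach m n g p q) →
        pvCell (pvFloodB m n g stack) q.1 q.2 = pvCell g q.1 q.2) := by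
  induction g, stack using pvFloodB.induct m n generalizing q with
  | case1 g =>
    rw [pvFloodB_nil]
    exact ⟨by rintro ⟨p, hp, _⟩; simp at hp, fun _ => rfl⟩
  | case2 g x y rest hb hc ih =>
    -- in-window cell reads none: impossible under RectP
    exfalso
    have := hR (x, y) (by simpa [InW] using hb)
    simp [hc] at this
  | case3 g x y rest hb hc ih =>
    -- popped cell already 1: not water
    rw [pvFloodB_skip m n g x y rest (Or.inr hc)]
    have hnw : ¬ Wat m n g (x, y) := fun hw => hw.2 hc
    have hiff : (∃ p ∈ (x, y) :: rest, Wat m n g p ∧ Reach m n g p q)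
        ↔ (∃ p ∈ rest, Wat m n g p ∧ Reach m n g p q) := by
      constructor
      · rintro ⟨p, hpm, hpw, hpr⟩
        rcases List.mem_cons.1 hpm with h | h
        · exact absurd (h ▸ hpw) hnw
        · exact ⟨p, h, hpw, hpr⟩
      · rintro ⟨p, hpm, hpw, hpr⟩
        exact ⟨p, List.mem_cons_of_mem _ hpm, hpw, hpr⟩
    rw [hiff]
    exact ih hR q hq
  | case4 g x y rest hb v hc hv ih =>
    -- the kill case
    have hbxy : InW m n (x, y) := by simpa [InW] using hb
    have hwat : Wat m n g (x, y) := ⟨hbxy, by simp [hc, hv]⟩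
    have hset := pvCell_pvSet g x y 1 hb.1 hb.2.2.1 (by simp [hc])
    set g1 := pvSet g x y 1 with hg1
    set stack' := ((x, y + 1) :: (x, y - 1) :: (x + 1, y) :: (x - 1, y) :: rest) with hstack'
    have hko1 : KO m n g g1 := by
      intro a _
      rcases Classical.em (a.1 = x ∧ a.2 = y) with h | h
      · exact Or.inr (by rw [hset a.1 a.2, if_pos h])
      · exact Or.inl (by rw [hset a.1 a.2, if_neg h])
    have hR1 : RectP m n g1 := rect_KO hR hko1
    have ih' := fun (q' : Int × Int) (hq' : InW m n q') => ih hR1 q' hq'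
    have korec : KO m n g1 (pvFloodB m n g1 stack') := by
      intro a ha
      rcases Classical.em (∃ p ∈ stack', Wat m n g1 p ∧ Reach m n g1 p a) with h | h
      · exact Or.inr ((ih' a ha).1 h)
      · exact Or.inl ((ih' a ha).2 h)
    -- neighbours of (x,y) are exactly the four pushed positions
    have hnbr_mem : ∀ b : Int × Int, AdjP (x, y) b → b ∈ stack' := by
      intro b hadj
      rcases hadj with h | h | h | h <;> simp [hstack', h]
    have hwat1_of : ∀ b : Int × Int, Wat m n g b → ¬ (b.1 = x ∧ b.2 = y) → Wat m n g1 b := by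
      intro b hwb hne
      exact ⟨hwb.1, by rw [hset b.1 b.2, if_neg hne]; exact hwb.2⟩
    -- step closure: a killed, b a water neighbour ⇒ b killed
    have stepcl : ∀ a b : Int × Int, Wat m n g a →
        pvCell (pvFloodB m n g1 stack') a.1 a.2 = some 1 → AdjP a b → Wat m n g b →
        pvCell (pvFloodB m n g1 stack') b.1 b.2 = some 1 := by
      intro a b hwa hka hadj hwb
      rcases Classical.em (b.1 = x ∧ b.2 = y) with hbxy' | hbxy'
      · have hb1 : pvCell g1 b.1 b.2 = some 1 := by rw [hset b.1 b.2, if_pos hbxy']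
        rcases korec b hwb.1 with h | h
        · rw [h, hb1]
        · exact h
      · have hwb1 : Wat m n g1 b := hwat1_of b hwb hbxy'
        rcases Classical.em (a.1 = x ∧ a.2 = y) with haxy | haxy
        · -- a is the popped cell: b is one of the four pushed positions
          have hax : a = (x, y) := by obtain ⟨a1, a2⟩ := a; simp_all
          refine (ih' b hwb.1).1 ⟨b, hnbr_mem b (hax ▸ hadj), hwb1, Relation.ReflTransGen.refl⟩
        · -- a was killed by the recursive call, so it is reachable from the new stack
          have hwa1 : Wat m n g1 a := hwat1_of a hwa haxy
          have : ∃ p ∈ stack', Wat m n g1 p ∧ Reach m n g1 p a := by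
            by_contra hno
            have := (ih' a hwa.1).2 hno
            rw [this] at hka
            exact hwa1.2 hka
          obtain ⟨p', hp'm, hp'w, hp'r⟩ := this
          exact (ih' b hwb.1).1 ⟨p', hp'm, hp'w, Relation.ReflTransGen.tail hp'r ⟨hadj, hwb1⟩⟩
    -- everything reachable from the old stack is killed
    have killed : ∀ p ∈ (x, y) :: rest, Wat m n g p → ∀ q', Reach m n g p q' →
        pvCell (pvFloodB m n g1 stack') q'.1 q'.2 = some 1 := by
      intro p hpm hpw q' hr
      induction hr with
      | refl =>
        rcases Classical.em (p.1 = x ∧ p.2 = y) with hpxy | hpxy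
        · have h1 : pvCell g1 p.1 p.2 = some 1 := by rw [hset p.1 p.2, if_pos hpxy]
          rcases korec p hpw.1 with h | h
          · rw [h, h1]
          · exact h
        · have hpw1 : Wat m n g1 p := hwat1_of p hpw hpxy
          have hpm' : p ∈ stack' := by
            rcases List.mem_cons.1 hpm with h | h
            · exact absurd (by subst h; exact ⟨rfl, rfl⟩) hpxy
            · simp [hstack', h]
          exact (ih' p hpw.1).1 ⟨p, hpm', hpw1, Relation.ReflTransGen.refl⟩
      | tail hab hstep ih2 =>
        exact stepcl _ _ (wat_of_reach hpw hab) ih2 hstep.1 hstep.2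
    constructor
    · rintro ⟨p, hpm, hpw, hpr⟩
      rw [pvFloodB_kill m n g x y rest hb hc hv]
      exact killed p hpm hpw q hpr
    · intro hnot
      rw [pvFloodB_kill m n g x y rest hb hc hv]
      have hq_ne : ¬ (q.1 = x ∧ q.2 = y) := by
        intro hqe
        have hqxy : q = (x, y) := by obtain ⟨q1, q2⟩ := q; simp_all
        exact hnot ⟨(x, y), List.mem_cons_self, hwat, hqxy ▸ Relation.ReflTransGen.refl⟩
      have hnot1 : ¬ (∃ p ∈ stack', Wat m n g1 p ∧ Reach m n g1 p q) := by
        rintro ⟨p', hp'm, hp'w, hp'r⟩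
        have hwt : Wat m n g p' := wat_KO hko1 hp'w
        have hrch : Reach m n g p' q := reach_KO hko1 hp'r
        rcases List.mem_cons.1 hp'm with h | hmem
        · exact hnot ⟨(x, y), List.mem_cons_self, hwat,
            Relation.ReflTransGen.head ⟨by simp [AdjP, h], hwt⟩ hrch⟩
        · rcases List.mem_cons.1 hmem with h | hmem
          · exact hnot ⟨(x, y), List.mem_cons_self, hwat,
              Relation.ReflTransGen.head ⟨by simp [AdjP, h], hwt⟩ hrch⟩
          · rcases List.mem_cons.1 hmem with h | hmem
            · exact hnot ⟨(x, y), List.mem_cons_self, hwat,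
                Relation.ReflTransGen.head ⟨by simp [AdjP, h], hwt⟩ hrch⟩
            · rcases List.mem_cons.1 hmem with h | hmem
              · exact hnot ⟨(x, y), List.mem_cons_self, hwat,
                  Relation.ReflTransGen.head ⟨by simp [AdjP, h], hwt⟩ hrch⟩
              · exact hnot ⟨p', List.mem_cons_of_mem _ hmem, hwt, hrch⟩
      rw [(ih' q hq).2 hnot1, hset q.1 q.2, if_neg hq_ne]
  | case5 g x y rest hb ih =>
    -- popped position out of the window: never water
    have hstep : ∀ P, pvFloodB m n g ((x, y) :: rest) = pvFloodB m n g rest ∨ P := by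
      intro _; left; exact pvFloodB_skip m n g x y rest (Or.inl hb)
    rw [pvFloodB_skip m n g x y rest (Or.inl hb)]
    have hiff : (∃ p ∈ (x, y) :: rest, Wat m n g p ∧ Reach m n g p q)
        ↔ (∃ p ∈ rest, Wat m n g p ∧ Reach m n g p q) := by
      constructor
      · rintro ⟨p, hpm, hpw, hpr⟩
        rcases List.mem_cons.1 hpm with h | h
        · exact absurd hpw.1 (by subst h; simpa [InW] using hb)
        · exact ⟨p, h, hpw, hpr⟩
      · rintro ⟨p, hpm, hpw, hpr⟩
        exact ⟨p, List.mem_cons_of_mem _ hpm, hpw, hpr⟩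
    rw [hiff]
    exact ih hR q hq
theorem InW_not_cond (m n r c : Int) : ¬ (r < 0 ∨ c < 0 ∨ r ≥ m ∨ c ≥ n) ↔ InW m n (r, c) := by
  simp only [InW]
  omega

theorem dfsA_char (mN nN : Nat) : ∀ (fuel : Nat) (g : List (List Int)) (r c : Int),
    RectP (mN : Int) (nN : Int) g → pvCount mN nN g < fuel →
    (¬ InW (mN : Int) (nN : Int) (r, c) →
        pvDfsA (mN : Int) (nN : Int) fuel g r c = (g, false))
    ∧ (InW (mN : Int) (nN : Int) (r, c) → pvCell g r c = some 1 →
        pvDfsA (mN : Int) (nN : Int) fuel g r c = (g, true))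
    ∧ (Wat (mN : Int) (nN : Int) g (r, c) →
        (∀ q : Int × Int, InW (mN : Int) (nN : Int) q →
          (Reach (mN : Int) (nN : Int) g (r, c) q →
            pvCell (pvDfsA (mN : Int) (nN : Int) fuel g r c).1 q.1 q.2 = some 1)
          ∧ (¬ Reach (mN : Int) (nN : Int) g (r, c) q →
            pvCell (pvDfsA (mN : Int) (nN : Int) fuel g r c).1 q.1 q.2 = pvCell g q.1 q.2))
        ∧ ((pvDfsA (mN : Int) (nN : Int) fuel g r c).2 = true ↔
            ClosedP (mN : Int) (nN : Int) g (r, c))) := by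
  intro fuel
  induction fuel with
  | zero => intro g r c _ hcnt; omega
  | succ fuel IH =>
    intro g r c hR hcnt
    by_cases hin : InW (mN : Int) (nN : Int) (r, c)
    case neg =>
      refine ⟨fun _ => ?_, fun h _ => absurd h hin, fun hw => absurd hw.1 hin⟩
      rw [pvDfsA, if_pos (by rw [← InW_not_cond] at hin; exact not_not.1 hin)]
    case pos =>
    obtain ⟨v, hv0⟩ := Option.isSome_iff_exists.1 (hR (r, c) hin)
    have hv : pvCell g r c = some v := hv0
    by_cases hv1 : v = 1
    · subst hv1
      refine ⟨fun h => absurd hin h, fun _ _ => ?_, fun hw => absurd hv hw.2⟩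
      rw [pvDfsA, if_neg ((InW_not_cond _ _ _ _).2 hin), hv]
      simp
    · -- the water case
      have hwat : Wat (mN : Int) (nN : Int) g (r, c) := ⟨hin, by simp [hv, hv1]⟩
      refine ⟨fun h => absurd hin h, fun _ h1 => absurd (hv.symm.trans h1) (by simp [hv1]), fun _ => ?_⟩
      have hrw : pvDfsA (mN : Int) (nN : Int) (fuel + 1) g r c =
          (let out1 := pvDfsA (mN : Int) (nN : Int) fuel (pvSet g r c 1) (r - 1) c
           let out2 := pvDfsA (mN : Int) (nN : Int) fuel out1.1 (r + 1) c
           let out3 := pvDfsA (mN : Int) (nN : Int) fuel out2.1 r (c - 1)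
           let out4 := pvDfsA (mN : Int) (nN : Int) fuel out3.1 r (c + 1)
           (out4.1, out1.2 && out2.2 && out3.2 && out4.2)) := by
        rw [pvDfsA, if_neg ((InW_not_cond _ _ _ _).2 hin)]
        simp only [hv]
        rw [if_neg hv1]
      -- names for the four sequential calls
      set g1 := pvSet g r c 1 with hg1def
      set out1 := pvDfsA (mN : Int) (nN : Int) fuel g1 (r - 1) c with ho1
      set out2 := pvDfsA (mN : Int) (nN : Int) fuel out1.1 (r + 1) c with ho2
      set out3 := pvDfsA (mN : Int) (nN : Int) fuel out2.1 r (c - 1) with ho3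
      set out4 := pvDfsA (mN : Int) (nN : Int) fuel out3.1 r (c + 1) with ho4
      have hrw2 : pvDfsA (mN : Int) (nN : Int) (fuel + 1) g r c
          = (out4.1, out1.2 && out2.2 && out3.2 && out4.2) := hrw
      clear hrw
      have hcell_set := pvCell_pvSet g r c 1 hin.1 hin.2.2.1 (by simp [hv])
      have hko1 : KO (mN : Int) (nN : Int) g g1 := by
        intro a _
        rcases Classical.em (a.1 = r ∧ a.2 = c) with h | h
        · exact Or.inr (by rw [hcell_set a.1 a.2, if_pos h])
        · exact Or.inl (by rw [hcell_set a.1 a.2, if_neg h])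
      have hR1 : RectP (mN : Int) (nN : Int) g1 := rect_KO hR hko1
      have hcnt1 : pvCount mN nN g1 < fuel := by
        have hlt := pvCount_set_lt mN nN g r c v hin.1 hin.2.1 hin.2.2.1 hin.2.2.2 hv hv1
        rw [← hg1def] at hlt
        omega
      -- a single recursive call, characterized uniformly
      have docall : ∀ (gi : List (List Int)) (p : Int × Int),
          RectP (mN : Int) (nN : Int) gi → pvCount mN nN gi < fuel →
          (∀ q : Int × Int, InW (mN : Int) (nN : Int) q →
            ((Wat (mN : Int) (nN : Int) gi p ∧ Reach (mN : Int) (nN : Int) gi p q) →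
              pvCell (pvDfsA (mN : Int) (nN : Int) fuel gi p.1 p.2).1 q.1 q.2 = some 1)
            ∧ (¬ (Wat (mN : Int) (nN : Int) gi p ∧ Reach (mN : Int) (nN : Int) gi p q) →
              pvCell (pvDfsA (mN : Int) (nN : Int) fuel gi p.1 p.2).1 q.1 q.2 = pvCell gi q.1 q.2))
          ∧ ((pvDfsA (mN : Int) (nN : Int) fuel gi p.1 p.2).2 = true ↔
              (InW (mN : Int) (nN : Int) p ∧
                (Wat (mN : Int) (nN : Int) gi p → ClosedP (mN : Int) (nN : Int) gi p))) := by
        intro gi p hRi hcnti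
        obtain ⟨hnotin, hone, hwatc⟩ := IH gi p.1 p.2 hRi hcnti
        by_cases hpin : InW (mN : Int) (nN : Int) p
        · by_cases hpw : Wat (mN : Int) (nN : Int) gi p
          · obtain ⟨hgr, hbl⟩ := hwatc hpw
            refine ⟨fun q hq => ⟨fun hS => (hgr q hq).1 hS.2,
              fun hS => (hgr q hq).2 (fun hr => hS ⟨hpw, hr⟩)⟩, ?_⟩
            rw [hbl]
            exact ⟨fun hcl => ⟨hpin, fun _ => hcl⟩, fun h => h.2 hpw⟩
          · have hc1 : pvCell gi p.1 p.2 = some 1 := by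
              by_contra hne
              exact hpw ⟨hpin, hne⟩
            rw [hone hpin hc1]
            refine ⟨fun q hq => ⟨fun hS => absurd hS.1 hpw, fun _ => rfl⟩, ?_⟩
            simp only [true_iff]
            exact ⟨hpin, fun hw => absurd hw hpw⟩
        · rw [hnotin hpin]
          refine ⟨fun q hq => ⟨fun hS => absurd hS.1.1 hpin, fun _ => rfl⟩, ?_⟩
          simp only [Bool.false_eq_true, false_iff]
          exact fun h => hpin h.1
      obtain ⟨hG1, hB1⟩ := docall g1 (r - 1, c) hR1 hcnt1
      have hko12 : KO (mN : Int) (nN : Int) g1 out1.1 := by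
        intro a ha
        rcases Classical.em (Wat (mN : Int) (nN : Int) g1 (r - 1, c) ∧
            Reach (mN : Int) (nN : Int) g1 (r - 1, c) a) with h | h
        · exact Or.inr ((hG1 a ha).1 h)
        · exact Or.inl ((hG1 a ha).2 h)
      have hR2 := rect_KO hR1 hko12
      have hcnt2 : pvCount mN nN out1.1 < fuel := Nat.lt_of_le_of_lt (pvCount_KO hko12) hcnt1
      obtain ⟨hG2, hB2⟩ := docall out1.1 (r + 1, c) hR2 hcnt2
      have hko23 : KO (mN : Int) (nN : Int) out1.1 out2.1 := by
        intro a ha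
        rcases Classical.em (Wat (mN : Int) (nN : Int) out1.1 (r + 1, c) ∧
            Reach (mN : Int) (nN : Int) out1.1 (r + 1, c) a) with h | h
        · exact Or.inr ((hG2 a ha).1 h)
        · exact Or.inl ((hG2 a ha).2 h)
      have hR3 := rect_KO hR2 hko23
      have hcnt3 : pvCount mN nN out2.1 < fuel := Nat.lt_of_le_of_lt (pvCount_KO hko23) hcnt2
      obtain ⟨hG3, hB3⟩ := docall out2.1 (r, c - 1) hR3 hcnt3
      have hko34 : KO (mN : Int) (nN : Int) out2.1 out3.1 := by
        intro a ha
        rcases Classical.em (Wat (mN : Int) (nN : Int) out2.1 (r, c - 1) ∧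
            Reach (mN : Int) (nN : Int) out2.1 (r, c - 1) a) with h | h
        · exact Or.inr ((hG3 a ha).1 h)
        · exact Or.inl ((hG3 a ha).2 h)
      have hR4 := rect_KO hR3 hko34
      have hcnt4 : pvCount mN nN out3.1 < fuel := Nat.lt_of_le_of_lt (pvCount_KO hko34) hcnt3
      obtain ⟨hG4, hB4⟩ := docall out3.1 (r, c + 1) hR4 hcnt4
      -- abbreviations for the four kill sets
      set S1 := fun q : Int × Int => Wat (mN : Int) (nN : Int) g1 (r - 1, c) ∧
        Reach (mN : Int) (nN : Int) g1 (r - 1, c) q with hS1def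
      set S2 := fun q : Int × Int => Wat (mN : Int) (nN : Int) out1.1 (r + 1, c) ∧
        Reach (mN : Int) (nN : Int) out1.1 (r + 1, c) q with hS2def
      set S3 := fun q : Int × Int => Wat (mN : Int) (nN : Int) out2.1 (r, c - 1) ∧
        Reach (mN : Int) (nN : Int) out2.1 (r, c - 1) q with hS3def
      set S4 := fun q : Int × Int => Wat (mN : Int) (nN : Int) out3.1 (r, c + 1) ∧
        Reach (mN : Int) (nN : Int) out3.1 (r, c + 1) q with hS4def
      have hGc : ∀ q : Int × Int, InW (mN : Int) (nN : Int) q →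
          ((S1 q ∨ S2 q ∨ S3 q ∨ S4 q) → pvCell out4.1 q.1 q.2 = some 1)
          ∧ (¬ (S1 q ∨ S2 q ∨ S3 q ∨ S4 q) → pvCell out4.1 q.1 q.2 = pvCell g1 q.1 q.2) := by
        intro q hq
        have per2 : pvCell out1.1 q.1 q.2 = some 1 → pvCell out2.1 q.1 q.2 = some 1 := by
          intro h1
          rcases Classical.em (S2 q) with h | h
          · exact (hG2 q hq).1 h
          · rw [(hG2 q hq).2 h]; exact h1
        have per3 : pvCell out2.1 q.1 q.2 = some 1 → pvCell out3.1 q.1 q.2 = some 1 := by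
          intro h1
          rcases Classical.em (S3 q) with h | h
          · exact (hG3 q hq).1 h
          · rw [(hG3 q hq).2 h]; exact h1
        have per4 : pvCell out3.1 q.1 q.2 = some 1 → pvCell out4.1 q.1 q.2 = some 1 := by
          intro h1
          rcases Classical.em (S4 q) with h | h
          · exact (hG4 q hq).1 h
          · rw [(hG4 q hq).2 h]; exact h1
        constructor
        · rintro (h | h | h | h)
          · exact per4 (per3 (per2 ((hG1 q hq).1 h)))
          · exact per4 (per3 ((hG2 q hq).1 h))
          · exact per4 ((hG3 q hq).1 h)
          · exact (hG4 q hq).1 h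
        · intro hno
          rw [(hG4 q hq).2 (fun h => hno (Or.inr (Or.inr (Or.inr h)))),
              (hG3 q hq).2 (fun h => hno (Or.inr (Or.inr (Or.inl h)))),
              (hG2 q hq).2 (fun h => hno (Or.inr (Or.inl h))),
              (hG1 q hq).2 (fun h => hno (Or.inl h))]
      have hko_g_o1 := KO_trans hko1 hko12
      have hko_g_o2 := KO_trans hko_g_o1 hko23
      have hko_g_o3 := KO_trans hko_g_o2 hko34
      have hne_of : ∀ q : Int × Int, q ≠ (r, c) → ¬ (q.1 = r ∧ q.2 = c) := by
        rintro ⟨a, b⟩ hne ⟨h1, h2⟩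
        exact hne (Prod.ext h1 h2)
      have hwat_g1 : ∀ q : Int × Int, Wat (mN : Int) (nN : Int) g q → q ≠ (r, c) →
          Wat (mN : Int) (nN : Int) g1 q := by
        intro q hw hne
        exact ⟨hw.1, by rw [hcell_set q.1 q.2, if_neg (hne_of q hne)]; exact hw.2⟩
      -- decomposition of the component of (r,c)
      have hU : ∀ q : Int × Int, Reach (mN : Int) (nN : Int) g (r, c) q ↔
          (q = (r, c) ∨ S1 q ∨ S2 q ∨ S3 q ∨ S4 q) := by
        intro q
        constructor
        · intro h
          induction h with
          | refl => exact Or.inl rfl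
          | tail hab hstep ih2 =>
            rename_i a' b'
            by_cases hbrc : b' = (r, c)
            · exact Or.inl hbrc
            · have hwb : Wat (mN : Int) (nN : Int) g b' := hstep.2
              have hwb1 : Wat (mN : Int) (nN : Int) g1 b' := hwat_g1 b' hwb hbrc
              by_cases h1 : S1 b'
              · exact Or.inr (Or.inl h1)
              by_cases h2 : S2 b'
              · exact Or.inr (Or.inr (Or.inl h2))
              by_cases h3 : S3 b'
              · exact Or.inr (Or.inr (Or.inr (Or.inl h3)))
              by_cases h4 : S4 b'
              · exact Or.inr (Or.inr (Or.inr (Or.inr h4)))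
              exfalso
              have hcb1 : pvCell out1.1 b'.1 b'.2 = pvCell g1 b'.1 b'.2 := (hG1 b' hwb.1).2 h1
              have hcb2 : pvCell out2.1 b'.1 b'.2 = pvCell g1 b'.1 b'.2 := by
                rw [(hG2 b' hwb.1).2 h2]; exact hcb1
              have hcb3 : pvCell out3.1 b'.1 b'.2 = pvCell g1 b'.1 b'.2 := by
                rw [(hG3 b' hwb.1).2 h3]; exact hcb2
              have hwb2 : Wat (mN : Int) (nN : Int) out1.1 b' := ⟨hwb.1, by rw [hcb1]; exact hwb1.2⟩
              have hwb3 : Wat (mN : Int) (nN : Int) out2.1 b' := ⟨hwb.1, by rw [hcb2]; exact hwb1.2⟩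
              have hwb4 : Wat (mN : Int) (nN : Int) out3.1 b' := ⟨hwb.1, by rw [hcb3]; exact hwb1.2⟩
              rcases ih2 with h | h | h | h | h
              · -- a' = (r,c): b' is one of the four neighbours
                subst h
                rcases hstep.1 with hd | hd | hd | hd
                · exact h1 (hd ▸ ⟨hd ▸ hwb1, Relation.ReflTransGen.refl⟩)
                · exact h2 (hd ▸ ⟨hd ▸ hwb2, Relation.ReflTransGen.refl⟩)
                · exact h3 (hd ▸ ⟨hd ▸ hwb3, Relation.ReflTransGen.refl⟩)
                · exact h4 (hd ▸ ⟨hd ▸ hwb4, Relation.ReflTransGen.refl⟩)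
              · exact h1 ⟨h.1, Relation.ReflTransGen.tail h.2 ⟨hstep.1, hwb1⟩⟩
              · exact h2 ⟨h.1, Relation.ReflTransGen.tail h.2 ⟨hstep.1, hwb2⟩⟩
              · exact h3 ⟨h.1, Relation.ReflTransGen.tail h.2 ⟨hstep.1, hwb3⟩⟩
              · exact h4 ⟨h.1, Relation.ReflTransGen.tail h.2 ⟨hstep.1, hwb4⟩⟩
        · rintro (h | h | h | h | h)
          · exact h ▸ Relation.ReflTransGen.refl
          · exact Relation.ReflTransGen.head
              ⟨by simp [AdjP], wat_KO hko1 h.1⟩ (reach_KO hko1 h.2)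
          · exact Relation.ReflTransGen.head
              ⟨by simp [AdjP], wat_KO hko_g_o1 h.1⟩ (reach_KO hko_g_o1 h.2)
          · exact Relation.ReflTransGen.head
              ⟨by simp [AdjP], wat_KO hko_g_o2 h.1⟩ (reach_KO hko_g_o2 h.2)
          · exact Relation.ReflTransGen.head
              ⟨by simp [AdjP], wat_KO hko_g_o3 h.1⟩ (reach_KO hko_g_o3 h.2)
      have hko_g1_G : KO (mN : Int) (nN : Int) g1 out4.1 := by
        intro a ha
        rcases Classical.em (S1 a ∨ S2 a ∨ S3 a ∨ S4 a) with h | h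
        · exact Or.inr ((hGc a ha).1 h)
        · exact Or.inl ((hGc a ha).2 h)
      rw [hrw2]
      constructor
      · intro q hq
        constructor
        · intro hreach
          rcases (hU q).1 hreach with h | h
          · have h1 : pvCell g1 q.1 q.2 = some 1 := by
              rw [hcell_set q.1 q.2, if_pos ⟨by rw [h], by rw [h]⟩]
            rcases hko_g1_G q hq with hk | hk
            · rw [hk, h1]
            · exact hk
          · exact (hGc q hq).1 h
        · intro hnreach
          have hnd := (hU q).not.1 hnreach
          push_neg at hnd
          obtain ⟨hne, h1, h2, h3, h4⟩ := hnd
          show pvCell out4.1 q.1 q.2 = pvCell g q.1 q.2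
          rw [(hGc q hq).2 (by rintro (h | h | h | h) <;> [exact h1 h; exact h2 h; exact h3 h; exact h4 h]),
            hcell_set q.1 q.2, if_neg (hne_of q hne)]
      · show (out1.2 && out2.2 && out3.2 && out4.2) = true ↔
          ClosedP (mN : Int) (nN : Int) g (r, c)
        constructor
        · intro hB
          simp only [Bool.and_eq_true] at hB
          obtain ⟨⟨⟨hb1, hb2⟩, hb3⟩, hb4⟩ := hB
          have hI1 := (hB1.1 hb1).1
          have hI2 := (hB2.1 hb2).1
          have hI3 := (hB3.1 hb3).1
          have hI4 := (hB4.1 hb4).1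
          intro q hreach
          rcases (hU q).1 hreach with h | h | h | h | h
          · subst h
            simp only [InW, IntR] at hI1 hI2 hI3 hI4 ⊢
            omega
          · exact (hB1.1 hb1).2 h.1 q h.2
          · exact (hB2.1 hb2).2 h.1 q h.2
          · exact (hB3.1 hb3).2 h.1 q h.2
          · exact (hB4.1 hb4).2 h.1 q h.2
        · intro hcl
          have hIrc : IntR (mN : Int) (nN : Int) (r, c) := hcl (r, c) Relation.ReflTransGen.refl
          simp only [IntR] at hIrc
          have hb1 : out1.2 = true := hB1.2 ⟨by simp only [InW]; omega,
            fun hw q' hr' => hcl q' ((hU q').2 (Or.inr (Or.inl ⟨hw, hr'⟩)))⟩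
          have hb2 : out2.2 = true := hB2.2 ⟨by simp only [InW]; omega,
            fun hw q' hr' => hcl q' ((hU q').2 (Or.inr (Or.inr (Or.inl ⟨hw, hr'⟩))))⟩
          have hb3 : out3.2 = true := hB3.2 ⟨by simp only [InW]; omega,
            fun hw q' hr' => hcl q' ((hU q').2 (Or.inr (Or.inr (Or.inr (Or.inl ⟨hw, hr'⟩)))))⟩
          have hb4 : out4.2 = true := hB4.2 ⟨by simp only [InW]; omega,
            fun hw q' hr' => hcl q' ((hU q').2 (Or.inr (Or.inr (Or.inr (Or.inr ⟨hw, hr'⟩)))))⟩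
          rw [hb1, hb2, hb3, hb4]
          rfl
theorem closed_of_reach {m n : Int} {g : List (List Int)} {p q : Int × Int}
    (hr : Reach m n g p q) (hcl : ClosedP m n g p) : ClosedP m n g q :=
  fun x hx => hcl x (Relation.ReflTransGen.trans hr hx)

theorem notclosed_of_reach {m n : Int} {g : List (List Int)} {p q : Int × Int}
    (hwp : Wat m n g p) (hr : Reach m n g p q) (hcl : ¬ ClosedP m n g p) : ¬ ClosedP m n g q :=
  fun hq => hcl (fun x hx => hq x (Relation.ReflTransGen.trans (reach_symm hwp hr) hx))

-- a grid g' that kills exactly the component of p (the common shape of the two floods)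
def Kills (m n : Int) (g : List (List Int)) (p : Int × Int) (g' : List (List Int)) : Prop :=
  ∀ x : Int × Int, InW m n x →
    (Reach m n g p x → pvCell g' x.1 x.2 = some 1)
    ∧ (¬ Reach m n g p x → pvCell g' x.1 x.2 = pvCell g x.1 x.2)

theorem KO_of_kills {m n : Int} {g g' : List (List Int)} {p : Int × Int}
    (h : Kills m n g p g') : KO m n g g' := by
  intro q hq
  rcases Classical.em (Reach m n g p q) with hr | hr
  · exact Or.inr ((h q hq).1 hr)
  · exact Or.inl ((h q hq).2 hr)

theorem wat_kill {m n : Int} {g g' : List (List Int)} {p q : Int × Int}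
    (hwp : Wat m n g p) (h : Kills m n g p g') (hq : InW m n q) :
    Wat m n g' q ↔ (Wat m n g q ∧ ¬ Reach m n g p q) := by
  constructor
  · intro hw
    have hnr : ¬ Reach m n g p q := fun hr => hw.2 ((h q hq).1 hr)
    exact ⟨wat_KO (KO_of_kills h) hw, hnr⟩
  · rintro ⟨hw, hnr⟩
    exact ⟨hq, by rw [(h q hq).2 hnr]; exact hw.2⟩

theorem reach_kill_eq {m n : Int} {g g' : List (List Int)} {p q : Int × Int}
    (hwp : Wat m n g p) (hwq : Wat m n g q) (hnr : ¬ Reach m n g p q)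
    (h : Kills m n g p g') :
    ∀ x, Reach m n g q x ↔ Reach m n g' q x := by
  intro x
  constructor
  · intro hx
    refine reach_preserve hwq (fun y hy => ?_) hx
    refine (h y (wat_of_reach hwq hy).1).2 (fun hpy => ?_)
    exact hnr (Relation.ReflTransGen.trans hpy (reach_symm hwq hy))
  · exact fun hx => reach_KO (KO_of_kills h) hx

theorem closed_kill_eq {m n : Int} {g g' : List (List Int)} {p q : Int × Int}
    (hwp : Wat m n g p) (hwq : Wat m n g q) (hnr : ¬ Reach m n g p q)
    (h : Kills m n g p g') :
    (ClosedP m n g' q ↔ ClosedP m n g q) := by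
  constructor
  · exact fun hc x hx => hc x ((reach_kill_eq hwp hwq hnr h x).1 hx)
  · exact fun hc x hx => hc x ((reach_kill_eq hwp hwq hnr h x).2 hx)

-- relation between A's current grid and B's pass-2 grid: B has additionally erased
-- exactly the non-closed water cells
def HRel (m n : Int) (gA gB : List (List Int)) : Prop :=
  ∀ q : Int × Int, InW m n q →
    ((Wat m n gA q ∧ ¬ ClosedP m n gA q) → pvCell gB q.1 q.2 = some 1)
    ∧ (¬ (Wat m n gA q ∧ ¬ ClosedP m n gA q) → pvCell gB q.1 q.2 = pvCell gA q.1 q.2)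

theorem rect_HRel {m n : Int} {gA gB : List (List Int)} (hR : RectP m n gA)
    (h : HRel m n gA gB) : RectP m n gB := by
  intro q hq
  rcases Classical.em (Wat m n gA q ∧ ¬ ClosedP m n gA q) with hc | hc
  · rw [(h q hq).1 hc]; rfl
  · rw [(h q hq).2 hc]; exact hR q hq

theorem KO_HRel {m n : Int} {gA gB : List (List Int)} (h : HRel m n gA gB) : KO m n gA gB := by
  intro q hq
  rcases Classical.em (Wat m n gA q ∧ ¬ ClosedP m n gA q) with hc | hc
  · exact Or.inr ((h q hq).1 hc)
  · exact Or.inl ((h q hq).2 hc)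

theorem reach_HRel_closed {m n : Int} {gA gB : List (List Int)} {p : Int × Int}
    (h : HRel m n gA gB) (hwp : Wat m n gA p) (hcl : ClosedP m n gA p) :
    ∀ q, Reach m n gA p q ↔ Reach m n gB p q := by
  intro q
  constructor
  · intro hq
    refine reach_preserve hwp (fun y hy => ?_) hq
    exact (h y (wat_of_reach hwp hy).1).2
      (fun hc => hc.2 (closed_of_reach hy hcl))
  · exact fun hq => reach_KO (KO_HRel h) hq
-- the two counting loops, as folds over the scan order
def AStep (m n : Int) (fuel : Nat) (st : List (List Int) × Int) (p : Int × Int) :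
    List (List Int) × Int :=
  if pvCell st.1 p.1 p.2 = some 0 then
    ((pvDfsA m n fuel st.1 p.1 p.2).1,
      st.2 + (if (pvDfsA m n fuel st.1 p.1 p.2).2 then 1 else 0))
  else st

def BStep (m n : Int) (st : List (List Int) × Int) (p : Int × Int) : List (List Int) × Int :=
  if pvCell st.1 p.1 p.2 = some 0 then (pvFloodB m n st.1 [p], st.2 + 1) else st

theorem main_loop (mN nN : Nat) (fuel : Nat) :
    ∀ (L : List (Int × Int)) (gA gB : List (List Int)) (cnt : Int),
    RectP (mN : Int) (nN : Int) gA → HRel (mN : Int) (nN : Int) gA gB →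
    (∀ p ∈ L, InW (mN : Int) (nN : Int) p) → pvCount mN nN gA < fuel →
    (L.foldl (AStep (mN : Int) (nN : Int) fuel) (gA, cnt)).2
      = (L.foldl (BStep (mN : Int) (nN : Int)) (gB, cnt)).2 := by
  intro L
  induction L with
  | nil => intro gA gB cnt _ _ _ _; rfl
  | cons p L IH =>
    intro gA gB cnt hRA hrel hin hcnt
    have hpin : InW (mN : Int) (nN : Int) p := hin p List.mem_cons_self
    have hinL : ∀ p' ∈ L, InW (mN : Int) (nN : Int) p' :=
      fun p' hp' => hin p' (List.mem_cons_of_mem _ hp')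
    obtain ⟨w, hw⟩ := Option.isSome_iff_exists.1 (hRA p hpin)
    have hchar := dfsA_char mN nN fuel gA p.1 p.2 hRA hcnt
    by_cases hw0 : w = 0
    · subst hw0
      have hwat : Wat (mN : Int) (nN : Int) gA p := ⟨hpin, by simp [hw]⟩
      obtain ⟨hgr, hbool⟩ := hchar.2.2 hwat
      have hkills : Kills (mN : Int) (nN : Int) gA p (pvDfsA (mN : Int) (nN : Int) fuel gA p.1 p.2).1 :=
        fun x hx => hgr x hx
      have hRA' : RectP (mN : Int) (nN : Int) (pvDfsA (mN : Int) (nN : Int) fuel gA p.1 p.2).1 :=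
        rect_KO hRA (KO_of_kills hkills)
      have hcnt' : pvCount mN nN (pvDfsA (mN : Int) (nN : Int) fuel gA p.1 p.2).1 < fuel :=
        Nat.lt_of_le_of_lt (pvCount_KO (KO_of_kills hkills)) hcnt
      have hstepA : List.foldl (AStep (mN : Int) (nN : Int) fuel) (gA, cnt) (p :: L)
          = List.foldl (AStep (mN : Int) (nN : Int) fuel)
              ((pvDfsA (mN : Int) (nN : Int) fuel gA p.1 p.2).1,
                cnt + (if (pvDfsA (mN : Int) (nN : Int) fuel gA p.1 p.2).2 then 1 else 0)) L := by
        simp only [List.foldl_cons, AStep, hw, if_pos rfl]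
        rw [if_pos trivial]
      by_cases hcl : ClosedP (mN : Int) (nN : Int) gA p
      · -- closed region: both count it and erase it
        have hb : (pvDfsA (mN : Int) (nN : Int) fuel gA p.1 p.2).2 = true := hbool.2 hcl
        have hgBp : pvCell gB p.1 p.2 = some 0 := by
          rw [(hrel p hpin).2 (fun hc => hc.2 hcl)]; exact hw
        have hwBp : Wat (mN : Int) (nN : Int) gB p := ⟨hpin, by simp [hgBp]⟩
        have hRB := rect_HRel hRA hrel
        have hriff := reach_HRel_closed hrel hwat hcl
        have hfl := fun (q : Int × Int) (hq : InW (mN : Int) (nN : Int) q) =>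
          floodB_char (mN : Int) (nN : Int) gB [p] hRB q hq
        have hkillsB : ∀ q : Int × Int, InW (mN : Int) (nN : Int) q →
            (Reach (mN : Int) (nN : Int) gA p q →
              pvCell (pvFloodB (mN : Int) (nN : Int) gB [p]) q.1 q.2 = some 1)
            ∧ (¬ Reach (mN : Int) (nN : Int) gA p q →
              pvCell (pvFloodB (mN : Int) (nN : Int) gB [p]) q.1 q.2 = pvCell gB q.1 q.2) := by
          intro q hq
          constructor
          · intro hr
            exact (hfl q hq).1 ⟨p, List.mem_cons_self, hwBp, (hriff q).1 hr⟩
          · intro hnr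
            refine (hfl q hq).2 ?_
            rintro ⟨p', hp'm, _, hp'r⟩
            rcases List.mem_cons.1 hp'm with h | h
            · exact hnr ((hriff q).2 (h ▸ hp'r))
            · simp at h
        have hstepB : List.foldl (BStep (mN : Int) (nN : Int)) (gB, cnt) (p :: L)
            = List.foldl (BStep (mN : Int) (nN : Int))
                (pvFloodB (mN : Int) (nN : Int) gB [p], cnt + 1) L := by
          simp only [List.foldl_cons, BStep, hgBp, if_pos rfl]
          rw [if_pos trivial]
        rw [hstepA, hstepB, hb]
        simp only [if_pos rfl]
        refine IH _ _ _ hRA' ?_ hinL hcnt'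
        -- re-establish the relation after both erasures
        intro q hq
        by_cases hqr : Reach (mN : Int) (nN : Int) gA p q
        · constructor
          · exact fun hc => absurd ((hkills q hq).1 hqr) hc.1.2
          · intro _
            rw [(hkillsB q hq).1 hqr, (hkills q hq).1 hqr]
        · have hA'q : pvCell (pvDfsA (mN : Int) (nN : Int) fuel gA p.1 p.2).1 q.1 q.2
              = pvCell gA q.1 q.2 := (hkills q hq).2 hqr
          have hB'q : pvCell (pvFloodB (mN : Int) (nN : Int) gB [p]) q.1 q.2
              = pvCell gB q.1 q.2 := (hkillsB q hq).2 hqr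
          by_cases hwq : Wat (mN : Int) (nN : Int) gA q
          · have hceq := closed_kill_eq hwat hwq hqr hkills
            constructor
            · rintro ⟨hw', hnc'⟩
              rw [hB'q]
              exact (hrel q hq).1 ⟨hwq, fun hc => hnc' (hceq.2 hc)⟩
            · intro hnc'
              rw [hB'q, hA'q]
              refine (hrel q hq).2 ?_
              rintro ⟨hwq2, hncA⟩
              exact hnc' ⟨(wat_kill hwat hkills hq).2 ⟨hwq2, hqr⟩, fun hc => hncA (hceq.1 hc)⟩
          · constructor
            · rintro ⟨hw', _⟩
              exact absurd ((wat_kill hwat hkills hq).1 hw').1 hwq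
            · intro _
              rw [hB'q, hA'q]
              exact (hrel q hq).2 (fun hc => hwq hc.1)
      · -- non-closed region: A erases it silently, B erased it in pass 1
        have hb : (pvDfsA (mN : Int) (nN : Int) fuel gA p.1 p.2).2 = false := by
          rcases Bool.eq_false_or_eq_true (pvDfsA (mN : Int) (nN : Int) fuel gA p.1 p.2).2 with h | h
          · exact absurd (hbool.1 h) hcl
          · exact h
        have hgBp : pvCell gB p.1 p.2 = some 1 := (hrel p hpin).1 ⟨hwat, hcl⟩
        have hstepB : List.foldl (BStep (mN : Int) (nN : Int)) (gB, cnt) (p :: L)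
            = List.foldl (BStep (mN : Int) (nN : Int)) (gB, cnt) L := by
          simp only [List.foldl_cons, BStep, hgBp]
          norm_num
        rw [hstepA, hstepB, hb]
        simp only [Bool.false_eq_true, if_false, add_zero]
        refine IH _ _ _ hRA' ?_ hinL hcnt'
        intro q hq
        by_cases hqr : Reach (mN : Int) (nN : Int) gA p q
        · constructor
          · exact fun hc => absurd ((hkills q hq).1 hqr) hc.1.2
          · intro _
            rw [(hkills q hq).1 hqr]
            exact (hrel q hq).1 ⟨wat_of_reach hwat hqr, notclosed_of_reach hwat hqr hcl⟩
        · have hA'q : pvCell (pvDfsA (mN : Int) (nN : Int) fuel gA p.1 p.2).1 q.1 q.2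
              = pvCell gA q.1 q.2 := (hkills q hq).2 hqr
          by_cases hwq : Wat (mN : Int) (nN : Int) gA q
          · have hceq := closed_kill_eq hwat hwq hqr hkills
            constructor
            · rintro ⟨hw', hnc'⟩
              exact (hrel q hq).1 ⟨hwq, fun hc => hnc' (hceq.2 hc)⟩
            · intro hnc'
              rw [hA'q]
              refine (hrel q hq).2 ?_
              rintro ⟨hwq2, hncA⟩
              exact hnc' ⟨(wat_kill hwat hkills hq).2 ⟨hwq2, hqr⟩, fun hc => hncA (hceq.1 hc)⟩
          · constructor
            · rintro ⟨hw', _⟩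
              exact absurd ((wat_kill hwat hkills hq).1 hw').1 hwq
            · intro _
              rw [hA'q]
              exact (hrel q hq).2 (fun hc => hwq hc.1)
    · -- not a 0 cell: both loops skip it
      have hAskip : pvCell gA p.1 p.2 ≠ some 0 := by simp [hw, hw0]
      have hBskip : pvCell gB p.1 p.2 ≠ some 0 := by
        by_cases hWnc : Wat (mN : Int) (nN : Int) gA p ∧ ¬ ClosedP (mN : Int) (nN : Int) gA p
        · rw [(hrel p hpin).1 hWnc]; simp
        · rw [(hrel p hpin).2 hWnc]; exact hAskip
      have hstepA : List.foldl (AStep (mN : Int) (nN : Int) fuel) (gA, cnt) (p :: L)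
          = List.foldl (AStep (mN : Int) (nN : Int) fuel) (gA, cnt) L := by
        simp only [List.foldl_cons, AStep, if_neg hAskip]
      have hstepB : List.foldl (BStep (mN : Int) (nN : Int)) (gB, cnt) (p :: L)
          = List.foldl (BStep (mN : Int) (nN : Int)) (gB, cnt) L := by
        simp only [List.foldl_cons, BStep, if_neg hBskip]
      rw [hstepA, hstepB]
      exact IH _ _ _ hRA hrel hinL hcnt
def Border (m n : Int) (p : Int × Int) : Prop :=
  p.1 = 0 ∨ p.1 = m - 1 ∨ p.2 = 0 ∨ p.2 = n - 1

def B1Step (m n : Int) (g : List (List Int)) (p : Int × Int) : List (List Int) :=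
  if (p.1 = 0 ∨ p.1 = m - 1 ∨ p.2 = 0 ∨ p.2 = n - 1) ∧ pvCell g p.1 p.2 ≠ some 1
  then pvFloodB m n g [p] else g

-- pass-1 invariant: only non-closed water cells of g0 have been overwritten (with 1),
-- and the overwritten region is closed under taking water neighbours
def Inv1 (m n : Int) (g0 g : List (List Int)) : Prop :=
  (∀ q : Int × Int, InW m n q →
    (pvCell g q.1 q.2 = pvCell g0 q.1 q.2 ∨
      (pvCell g q.1 q.2 = some 1 ∧ Wat m n g0 q ∧ ¬ ClosedP m n g0 q)))
  ∧ (∀ q : Int × Int, InW m n q → pvCell g q.1 q.2 ≠ pvCell g0 q.1 q.2 →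
      ∀ x, AdjP q x → Wat m n g0 x → pvCell g x.1 x.2 = some 1)

theorem rect_Inv1 {m n : Int} {g0 g : List (List Int)} (hR0 : RectP m n g0)
    (hI : Inv1 m n g0 g) : RectP m n g := by
  intro q hq
  rcases hI.1 q hq with h | h
  · rw [h]; exact hR0 q hq
  · rw [h.1]; rfl

theorem KO_Inv1 {m n : Int} {g0 g : List (List Int)} (hI : Inv1 m n g0 g) : KO m n g0 g := by
  intro q hq
  rcases hI.1 q hq with h | h
  · exact Or.inl h
  · exact Or.inr h.1

theorem pass1_loop (m n : Int) (g0 : List (List Int)) (hR0 : RectP m n g0) :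
    ∀ (L : List (Int × Int)) (g : List (List Int)), Inv1 m n g0 g →
    (∀ p ∈ L, InW m n p) →
    Inv1 m n g0 (L.foldl (B1Step m n) g)
    ∧ (∀ q : Int × Int, InW m n q → pvCell g q.1 q.2 = some 1 →
        pvCell (L.foldl (B1Step m n) g) q.1 q.2 = some 1)
    ∧ (∀ p ∈ L, Border m n p → Wat m n g0 p →
        pvCell (L.foldl (B1Step m n) g) p.1 p.2 = some 1) := by
  intro L
  induction L with
  | nil =>
    intro g hI _
    exact ⟨hI, fun q _ h => h, fun p hp => absurd hp (by simp)⟩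
  | cons p L IH =>
    intro g hI hin
    have hpin : InW m n p := hin p List.mem_cons_self
    have hinL : ∀ p' ∈ L, InW m n p' := fun p' hp' => hin p' (List.mem_cons_of_mem _ hp')
    have hRg : RectP m n g := rect_Inv1 hR0 hI
    by_cases hcond : (p.1 = 0 ∨ p.1 = m - 1 ∨ p.2 = 0 ∨ p.2 = n - 1) ∧ pvCell g p.1 p.2 ≠ some 1
    · -- flood from the border cell p
      have hstep : List.foldl (B1Step m n) g (p :: L)
          = List.foldl (B1Step m n) (pvFloodB m n g [p]) L := by
        simp only [List.foldl_cons, B1Step, if_pos hcond]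
      have hwgp : Wat m n g p := ⟨hpin, hcond.2⟩
      have hfl := fun (q : Int × Int) (hq : InW m n q) => floodB_char m n g [p] hRg q hq
      have hkills : Kills m n g p (pvFloodB m n g [p]) := by
        intro q hq
        constructor
        · intro hr
          exact (hfl q hq).1 ⟨p, List.mem_cons_self, hwgp, hr⟩
        · intro hnr
          refine (hfl q hq).2 ?_
          rintro ⟨p', hp'm, _, hp'r⟩
          rcases List.mem_cons.1 hp'm with h | h
          · exact hnr (h ▸ hp'r)
          · simp at h
      have hko0g : KO m n g0 g := KO_Inv1 hI
      have hw0p : Wat m n g0 p := by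
        rcases hI.1 p hpin with h | h
        · exact ⟨hpin, h ▸ hcond.2⟩
        · exact absurd h.1 hcond.2
      have hncl0 : ¬ ClosedP m n g0 p := by
        intro hcl
        have hInt := hcl p Relation.ReflTransGen.refl
        rcases hpin with ⟨h1, h2, h3, h4⟩
        rcases hcond.1 with h | h | h | h <;> (simp only [IntR] at hInt; omega)
      -- cells killed now are non-closed water cells of g0
      have hkilled0 : ∀ q : Int × Int, Reach m n g p q →
          Wat m n g0 q ∧ ¬ ClosedP m n g0 q := by
        intro q hr
        have hr0 : Reach m n g0 p q := reach_KO hko0g hr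
        exact ⟨wat_of_reach hw0p hr0, notclosed_of_reach hw0p hr0 hncl0⟩
      -- 1-cells persist under the flood
      have hper : ∀ q : Int × Int, InW m n q → pvCell g q.1 q.2 = some 1 →
          pvCell (pvFloodB m n g [p]) q.1 q.2 = some 1 := by
        intro q hq h1
        rcases Classical.em (Reach m n g p q) with hr | hr
        · exact (hkills q hq).1 hr
        · rw [(hkills q hq).2 hr]; exact h1
      have hI' : Inv1 m n g0 (pvFloodB m n g [p]) := by
        constructor
        · intro q hq
          rcases Classical.em (Reach m n g p q) with hr | hr
          · exact Or.inr ⟨(hkills q hq).1 hr, hkilled0 q hr⟩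
          · rw [(hkills q hq).2 hr]; exact hI.1 q hq
        · intro q hq hch x hadj hwx
          have hxin : InW m n x := hwx.1
          by_cases hx1 : pvCell g x.1 x.2 = some 1
          · exact hper x hxin hx1
          · have hwgx : Wat m n g x := ⟨hxin, hx1⟩
            rcases Classical.em (Reach m n g p q) with hr | hr
            · exact (hkills x hxin).1 (Relation.ReflTransGen.tail hr ⟨hadj, hwgx⟩)
            · have hgq : pvCell (pvFloodB m n g [p]) q.1 q.2 = pvCell g q.1 q.2 :=
                (hkills q hq).2 hr
              have hch' : pvCell g q.1 q.2 ≠ pvCell g0 q.1 q.2 := by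
                rw [hgq] at hch; exact hch
              exact hper x hxin (hI.2 q hq hch' x hadj hwx)
      obtain ⟨hI'', hper'', hmem''⟩ := IH (pvFloodB m n g [p]) hI' hinL
      refine ⟨hstep ▸ hI'', hstep ▸ (fun q hq h1 => hper'' q hq (hper q hq h1)), ?_⟩
      intro p' hp' hb' hw'
      rcases List.mem_cons.1 hp' with h | h
      · subst h
        rw [hstep]
        exact hper'' p' hpin ((hkills p' hpin).1 Relation.ReflTransGen.refl)
      · rw [hstep]
        exact hmem'' p' h hb' hw'
    · -- skip
      have hstep : List.foldl (B1Step m n) g (p :: L) = List.foldl (B1Step m n) g L := by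
        simp only [List.foldl_cons, B1Step, if_neg hcond]
      obtain ⟨hI'', hper'', hmem''⟩ := IH g hI hinL
      refine ⟨hstep ▸ hI'', hstep ▸ hper'', ?_⟩
      intro p' hp' hb' hw'
      rcases List.mem_cons.1 hp' with h | h
      · subst h
        rw [hstep]
        refine hper'' p' hpin ?_
        by_contra hne
        exact hcond ⟨hb', hne⟩
      · rw [hstep]
        exact hmem'' p' h hb' hw'
theorem pass1_HRel (mN nN : Nat) (g0 : List (List Int)) (hR0 : RectP (mN : Int) (nN : Int) g0) :
    HRel (mN : Int) (nN : Int) g0 ((pvScan mN nN).foldl (B1Step (mN : Int) (nN : Int)) g0) := by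
  have hI0 : Inv1 (mN : Int) (nN : Int) g0 g0 :=
    ⟨fun q _ => Or.inl rfl, fun q _ h => absurd rfl h⟩
  obtain ⟨hI, hper, hmem⟩ := pass1_loop (mN : Int) (nN : Int) g0 hR0 (pvScan mN nN) g0 hI0
    (fun p hp => (mem_pvScan mN nN p).1 hp)
  set g1 := (pvScan mN nN).foldl (B1Step (mN : Int) (nN : Int)) g0 with hg1
  -- every non-closed water cell ends up erased
  have hcov : ∀ q : Int × Int, Wat (mN : Int) (nN : Int) g0 q →
      ¬ ClosedP (mN : Int) (nN : Int) g0 q → pvCell g1 q.1 q.2 = some 1 := by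
    intro q hwq hncq
    have : ∃ x, Reach (mN : Int) (nN : Int) g0 q x ∧ ¬ IntR (mN : Int) (nN : Int) x := by
      by_contra hno
      push_neg at hno
      exact hncq (fun x hx => hno x hx)
    obtain ⟨x, hx, hxI⟩ := this
    have hwx : Wat (mN : Int) (nN : Int) g0 x := wat_of_reach hwq hx
    have hbx : Border (mN : Int) (nN : Int) x := by
      obtain ⟨h1, h2, h3, h4⟩ := hwx.1
      simp only [IntR] at hxI
      simp only [Border]
      omega
    have hx1 : pvCell g1 x.1 x.2 = some 1 :=
      hmem x ((mem_pvScan mN nN x).2 hwx.1) hbx hwx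
    -- walk back along the path: every cell on it is erased
    have hback : ∀ y, Reach (mN : Int) (nN : Int) g0 x y → pvCell g1 y.1 y.2 = some 1 := by
      intro y hy
      induction hy with
      | refl => exact hx1
      | tail hab hstep ih =>
        rename_i a' b'
        have hwa : Wat (mN : Int) (nN : Int) g0 a' := wat_of_reach hwx hab
        have hch : pvCell g1 a'.1 a'.2 ≠ pvCell g0 a'.1 a'.2 := by
          rw [ih]; exact fun h => hwa.2 h.symm
        exact hI.2 a' hwa.1 hch b' hstep.1 hstep.2
    exact hback q (reach_symm hwq hx)
  intro q hq
  constructor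
  · exact fun hc => hcov q hc.1 hc.2
  · intro hc
    rcases hI.1 q hq with h | h
    · exact h
    · exact absurd ⟨h.2.1, h.2.2⟩ hc

theorem length_pvScan (mN nN : Nat) : (pvScan mN nN).length = mN * nN := by
  simp [pvScan, List.length_flatMap]

theorem foldl_scan {β : Type} (mN nN : Nat) (f : β → Int × Int → β) (init : β) :
    (List.range mN).foldl (fun (st : β) (i : Nat) =>
        (List.range nN).foldl (fun (st : β) (j : Nat) => f st ((i : Int), (j : Int))) st) init
      = (pvScan mN nN).foldl f init := by
  rw [pvScan, List.foldl_flatMap]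
  have hfun : (fun (st : β) (i : Nat) =>
        (List.range nN).foldl (fun (st : β) (j : Nat) => f st ((i : Int), (j : Int))) st)
      = (fun (acc : β) (x : Nat) =>
        List.foldl f acc ((List.range nN).map (fun (j : Nat) => ((x : Int), (j : Int))))) := by
    funext st i
    rw [List.foldl_map]
  rw [hfun]
theorem rect_of_pre (row0 : List Int) (rest : List (List Int))
    (hlen : ∀ row ∈ row0 :: rest, row0.length ≤ row.length) :
    RectP ((row0 :: rest).length : Int) (row0.length : Int) (row0 :: rest) := by
  intro p hp
  obtain ⟨h1, h2, h3, h4⟩ := hp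
  have hr : p.1.toNat < (row0 :: rest).length := by omega
  simp only [pvCell, if_pos (And.intro h1 h3), List.getElem?_eq_getElem hr, Option.bind_some]
  have hmem : (row0 :: rest)[p.1.toNat] ∈ row0 :: rest := List.getElem_mem hr
  have hle := hlen _ hmem
  have hc : p.2.toNat < ((row0 :: rest)[p.1.toNat]).length := by omega
  simp [List.getElem?_eq_getElem hc]

theorem ports_agree (grid : List (List Int)) (hPre : Pre_count_closed_islands grid) :
    count_closed_islands grid = count_closed_islands_alt grid := by
  obtain ⟨row0, rest, rfl⟩ := List.exists_cons_of_ne_nil hPre.1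
  have hlen : ∀ row ∈ row0 :: rest, row0.length ≤ row.length := by
    intro row hrow
    simpa using hPre.2 row hrow
  have hR0 := rect_of_pre row0 rest hlen
  have hcnt : pvCount (row0 :: rest).length row0.length (row0 :: rest)
      < (row0 :: rest).length * row0.length + 1 :=
    Nat.lt_succ_of_le (le_trans List.countP_le_length
      (le_of_eq (length_pvScan (row0 :: rest).length row0.length)))
  have hA : count_closed_islands (row0 :: rest)
      = ((pvScan (row0 :: rest).length row0.length).foldl
          (AStep ((row0 :: rest).length : Int) (row0.length : Int)
            ((row0 :: rest).length * row0.length + 1)) (row0 :: rest, 0)).2 := by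
    rw [← foldl_scan (row0 :: rest).length row0.length
      (AStep ((row0 :: rest).length : Int) (row0.length : Int)
        ((row0 :: rest).length * row0.length + 1)) ((row0 :: rest), 0)]
    rfl
  have hB : count_closed_islands_alt (row0 :: rest)
      = ((pvScan (row0 :: rest).length row0.length).foldl
          (BStep ((row0 :: rest).length : Int) (row0.length : Int))
          ((pvScan (row0 :: rest).length row0.length).foldl
            (B1Step ((row0 :: rest).length : Int) (row0.length : Int)) (row0 :: rest), 0)).2 := by
    rw [← foldl_scan (row0 :: rest).length row0.length
      (BStep ((row0 :: rest).length : Int) (row0.length : Int)),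
      ← foldl_scan (row0 :: rest).length row0.length
      (B1Step ((row0 :: rest).length : Int) (row0.length : Int)) (row0 :: rest)]
    rfl
  rw [hA, hB]
  exact main_loop (row0 :: rest).length row0.length ((row0 :: rest).length * row0.length + 1)
    (pvScan (row0 :: rest).length row0.length) (row0 :: rest) _ 0 hR0
    (pass1_HRel (row0 :: rest).length row0.length (row0 :: rest) hR0)
    (fun p hp => (mem_pvScan _ _ p).1 hp) hcnt

-- ===== VERDICT (by name: the statement is the Claim_ definition above) =====
theorem count_closed_islands_spec : Claim_equal_count_closed_islands := by
  intro grid _ hPre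
  unfold Spec_count_closed_islands
  exact ports_agree grid hPre
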